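-- pv_equiv track=rewrite | github.com/ArnabiDutta/twitching_detection_alltracker | new_rule.py | _find_longest_contig_segment
-- ===== SOURCE A (Python) =====
-- def _find_longest_contig_segment(bool_arr):
--     """Finds the start and end index of the longest contiguous block of True."""
--     max_len = 0
--     best_start = -1
--     current_len = 0
--     current_start = -1
--     for i, val in enumerate(bool_arr):
--         if val:
--             if current_len == 0:
--                 current_start = i
--             current_len += 1
--         else:
--             if current_len > max_len:
--                 max_len = current_len
--                 best_start = current_start
--             current_len = 0
--     # Final check in case the longest segment is at the end
--     if current_len > max_len:
--         max_len = current_len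
--         best_start = current_start
--
--     if best_start == -1:
--         return 0, 0
--     return best_start, best_start + max_len
-- ===== SOURCE B (Python) =====
-- from itertools import groupby
--
-- def _find_longest_contig_segment(bool_arr):
--     """Finds the start and end index of the longest contiguous block of True."""
--     runs = []
--     idx = 0
--     for key, grp in groupby(bool_arr, key=bool):
--         n = sum(1 for _ in grp)
--         if key:
--             runs.append((idx, n))
--         idx += n
--     if not runs:
--         return 0, 0
--     best = max(runs, key=lambda r: r[1])
--     return best[0], best[0] + best[1]
-- ===== Notes on version B (the rewrite author's own statement) =====
-- stated objective: idiomatic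
-- what changed: Replaces the incremental four-variable state machine with a group-then-select decomposition: groupby splits the array into runs, truthy runs are collected as (start, length), and max(..., key=length) picks the first longest.
import Mathlib
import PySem

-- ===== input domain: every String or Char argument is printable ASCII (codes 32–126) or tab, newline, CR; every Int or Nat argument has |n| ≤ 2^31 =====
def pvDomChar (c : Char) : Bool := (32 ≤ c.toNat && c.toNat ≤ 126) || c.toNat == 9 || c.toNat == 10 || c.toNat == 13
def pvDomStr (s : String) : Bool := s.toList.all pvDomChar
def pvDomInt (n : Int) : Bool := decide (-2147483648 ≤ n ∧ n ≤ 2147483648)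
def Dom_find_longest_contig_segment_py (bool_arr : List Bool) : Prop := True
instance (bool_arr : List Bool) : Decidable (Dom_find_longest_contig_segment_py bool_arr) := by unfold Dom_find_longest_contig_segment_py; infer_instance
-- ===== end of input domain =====

-- B replaces A's incremental state machine with a run-decomposition (groupby) plus a
-- first-longest selection; the two agree on every input (both total).

-- ===== PORT A =====
-- enumerate(bool_arr): pairs (index, value) starting at 0
def pvEnumFrom (i : Int) : List Bool → List (Int × Bool)
  | [] => []
  | x :: xs => (i, x) :: pvEnumFrom (i + 1) xs

-- one iteration of A's for-loop; state = (max_len, best_start, current_len, current_start)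
def pvStepA (s : Int × Int × Int × Int) (iv : Int × Bool) : Int × Int × Int × Int :=
  if iv.2 then
    let cs := if s.2.2.1 = 0 then iv.1 else s.2.2.2
    (s.1, s.2.1, s.2.2.1 + 1, cs)
  else
    if s.2.2.1 > s.1 then (s.2.2.1, s.2.2.2, 0, s.2.2.2)
    else (s.1, s.2.1, 0, s.2.2.2)

-- the code after the loop: final flush and the best_start == -1 check
def pvFinalA (s : Int × Int × Int × Int) : Int × Int :=
  let ml := if s.2.2.1 > s.1 then s.2.2.1 else s.1
  let bs := if s.2.2.1 > s.1 then s.2.2.2 else s.2.1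
  if bs = -1 then (0, 0) else (bs, bs + ml)

def find_longest_contig_segment_py (bool_arr : List Bool) : Int × Int :=
  pvFinalA ((pvEnumFrom 0 bool_arr).foldl pvStepA (0, -1, 0, -1))

-- ===== PORT B =====
-- itertools.groupby(bool_arr, key=bool), keeping (start, length) of the truthy groups
def pvRuns (l : List Bool) (idx : Int) : List (Int × Int) :=
  match l with
  | [] => []
  | x :: xs =>
    let n : Int := 1 + (xs.takeWhile (· == x)).length
    let rest := xs.dropWhile (· == x)
    if x then (idx, n) :: pvRuns rest (idx + n) else pvRuns rest (idx + n)
termination_by l.length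
decreasing_by
  all_goals
    exact Nat.lt_succ_of_le (List.length_dropWhile_le _ _)

-- max(runs, key=lambda r: r[1]) returns the first run of maximal length
def pvPick (b r : Int × Int) : Int × Int := if r.2 > b.2 then r else b

def find_longest_contig_segment_py_alt (bool_arr : List Bool) : Int × Int :=
  match pvRuns bool_arr 0 with
  | [] => (0, 0)
  | h :: t =>
    let best := t.foldl pvPick h
    (best.1, best.1 + best.2)

-- ===== PRECONDITION & SPEC =====
def Spec_find_longest_contig_segment_py (bool_arr : List Bool) (out : Int × Int) : Prop := out = find_longest_contig_segment_py_alt bool_arr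
instance (bool_arr : List Bool) (out : Int × Int) : Decidable (Spec_find_longest_contig_segment_py bool_arr out) := by unfold Spec_find_longest_contig_segment_py; infer_instance

-- ===== CLAIM (what is proved, stated in full; the proofs are below) =====
def Claim_equal_find_longest_contig_segment_py : Prop := ∀ (bool_arr : List Bool), Dom_find_longest_contig_segment_py bool_arr → Spec_find_longest_contig_segment_py bool_arr (find_longest_contig_segment_py bool_arr)

-- ===== LEMMAS AND PROOFS =====

-- proof-only helper: A's remaining result given best-so-far (bs, ml) and the remaining runs
def pvResult (ml bs : Int) (runs : List (Int × Int)) : Int × Int :=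
  let p := runs.foldl pvPick (bs, ml)
  if p.1 = -1 then (0, 0) else (p.1, p.1 + p.2)

lemma pvRuns_cons (x : Bool) (xs : List Bool) (i : Int) :
    pvRuns (x :: xs) i =
      if x then
        (i, 1 + ((xs.takeWhile (· == x)).length : Int)) ::
          pvRuns (xs.dropWhile (· == x)) (i + (1 + ((xs.takeWhile (· == x)).length : Int)))
      else pvRuns (xs.dropWhile (· == x)) (i + (1 + ((xs.takeWhile (· == x)).length : Int))) := by
  rw [pvRuns]

lemma pvEnumFrom_append (a b : List Bool) (i : Int) :
    pvEnumFrom i (a ++ b) = pvEnumFrom i a ++ pvEnumFrom (i + a.length) b := by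
  induction a generalizing i with
  | nil => simp [pvEnumFrom]
  | cons x xs ih =>
      simp [pvEnumFrom, ih (i + 1)]
      ring_nf

lemma pvStepA_true (i ml bs cl cs : Int) (hcl : cl ≠ 0) :
    pvStepA (ml, bs, cl, cs) (i, true) = (ml, bs, cl + 1, cs) := by
  simp [pvStepA, hcl]

lemma pvStepA_true0 (i ml bs cs : Int) :
    pvStepA (ml, bs, 0, cs) (i, true) = (ml, bs, 1, i) := by
  simp [pvStepA]

lemma pvStepA_false0 (i ml bs cs : Int) (hml : 0 ≤ ml) :
    pvStepA (ml, bs, 0, cs) (i, false) = (ml, bs, 0, cs) := by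
  simp [pvStepA, show ¬ ((0:Int) > ml) by omega]

-- a run of trues, entered while inside a segment, just extends current_len
lemma pvFold_true (a : List Bool) (h : ∀ x ∈ a, x = true) :
    ∀ (i ml bs cl cs : Int), 0 < cl →
    (pvEnumFrom i a).foldl pvStepA (ml, bs, cl, cs) = (ml, bs, cl + a.length, cs) := by
  induction a with
  | nil => intro i ml bs cl cs _; simp [pvEnumFrom]
  | cons x xs ih =>
      intro i ml bs cl cs hcl
      have hx : x = true := h x (by simp)
      have hxs : ∀ y ∈ xs, y = true := fun y hy => h y (by simp [hy])
      simp only [pvEnumFrom, List.foldl_cons, hx, pvStepA_true i ml bs cl cs (by omega)]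
      rw [ih hxs (i + 1) ml bs (cl + 1) cs (by omega)]
      simp; ring

-- a run of falses, entered at a segment boundary (current_len = 0), is a no-op
lemma pvFold_false (a : List Bool) (h : ∀ x ∈ a, x = false) :
    ∀ (i ml bs cs : Int), 0 ≤ ml →
    (pvEnumFrom i a).foldl pvStepA (ml, bs, 0, cs) = (ml, bs, 0, cs) := by
  induction a with
  | nil => intro i ml bs cs _; simp [pvEnumFrom]
  | cons x xs ih =>
      intro i ml bs cs hml
      have hx : x = false := h x (by simp)
      have hxs : ∀ y ∈ xs, y = false := fun y hy => h y (by simp [hy])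
      simp only [pvEnumFrom, List.foldl_cons, hx, pvStepA_false0 i ml bs cs hml]
      exact ih hxs (i + 1) ml bs cs hml

-- flushing early (when the next element is false or the list ends) does not change the answer
lemma pvFlush (rest : List Bool) (hrest : rest = [] ∨ ∃ r rs, rest = r :: rs ∧ r = false)
    (j ml bs cl cs : Int) (hcl : 0 < cl) :
    pvFinalA ((pvEnumFrom j rest).foldl pvStepA (ml, bs, cl, cs)) =
    pvFinalA ((pvEnumFrom j rest).foldl pvStepA
      ((if cl > ml then cl else ml), (if cl > ml then cs else bs), 0, cs)) := by
  rcases hrest with h | ⟨r, rs, hh, hr⟩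
  · subst h
    by_cases hgt : cl > ml
    · simp [pvEnumFrom, pvFinalA, hgt, show ¬ ((0:Int) > cl) by omega]
    · simp [pvEnumFrom, pvFinalA, hgt, show ¬ ((0:Int) > ml) by omega]
  · subst hh; subst hr
    simp only [pvEnumFrom, List.foldl_cons]
    by_cases hgt : cl > ml
    · rw [if_pos hgt, if_pos hgt,
        pvStepA_false0 j cl cs cs (by omega),
        show pvStepA (ml, bs, cl, cs) (j, false) = (cl, cs, 0, cs) by simp [pvStepA, hgt]]
    · rw [if_neg hgt, if_neg hgt,
        pvStepA_false0 j ml bs cs (by omega),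
        show pvStepA (ml, bs, cl, cs) (j, false) = (ml, bs, 0, cs) by simp [pvStepA, hgt]]

lemma pvRuns_pos : ∀ (N : ℕ) (l : List Bool), l.length ≤ N → ∀ (i : Int), ∀ r ∈ pvRuns l i, i ≤ r.1 ∧ 1 ≤ r.2 := by
  intro N
  induction N with
  | zero =>
      intro l hl i r hr
      have : l = [] := List.length_eq_zero_iff.mp (Nat.le_zero.mp hl)
      subst this; simp [pvRuns] at hr
  | succ N ih =>
      intro l hl i r hr
      cases l with
      | nil => simp [pvRuns] at hr
      | cons x xs =>
          rw [pvRuns_cons] at hr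
          have hlen : (xs.dropWhile (· == x)).length ≤ N := by
            have := List.length_dropWhile_le (· == x) xs
            simp at hl; omega
          have h0 : (0:Int) ≤ ((xs.takeWhile (· == x)).length : Int) := by positivity
          cases x with
          | false =>
              simp only [Bool.false_eq_true, if_false] at hr
              have := ih _ hlen _ r hr
              exact ⟨by omega, this.2⟩
          | true =>
              simp only [if_true] at hr
              rcases List.mem_cons.mp hr with h | h
              · subst h; exact ⟨le_rfl, by simp at h0; omega⟩
              · have := ih _ hlen _ r h
                exact ⟨by omega, this.2⟩

lemma pvPick_mem (p : Int × Int) (rs : List (Int × Int)) :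
    rs.foldl pvPick p = p ∨ rs.foldl pvPick p ∈ rs := by
  induction rs generalizing p with
  | nil => simp
  | cons r rs ih =>
      simp only [List.foldl_cons]
      rcases ih (pvPick p r) with h | h
      · rw [h]; unfold pvPick
        split_ifs with hgt
        · right; simp
        · left; rfl
      · right; simp [h]

-- the main invariant: from a boundary state, A's remaining run equals selecting over B's runs
lemma pvMain : ∀ (N : ℕ) (l : List Bool), l.length ≤ N → ∀ (i ml bs cs : Int),
    0 ≤ i → 0 ≤ ml → (bs = -1 → ml = 0) →
    pvFinalA ((pvEnumFrom i l).foldl pvStepA (ml, bs, 0, cs)) = pvResult ml bs (pvRuns l i) := by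
  intro N
  induction N with
  | zero =>
      intro l hl i ml bs cs hi hml hbs
      have : l = [] := List.length_eq_zero_iff.mp (Nat.le_zero.mp hl)
      subst this
      simp [pvEnumFrom, pvRuns, pvResult, pvFinalA, show ¬ ((0:Int) > ml) by omega]
  | succ N ih =>
      intro l hl i ml bs cs hi hml hbs
      cases l with
      | nil =>
          simp [pvEnumFrom, pvRuns, pvResult, pvFinalA, show ¬ ((0:Int) > ml) by omega]
      | cons x xs =>
          have hrlen : (xs.dropWhile (· == x)).length ≤ N := by
            have := List.length_dropWhile_le (· == x) xs
            simp at hl; omega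
          have htwall : ∀ y ∈ xs.takeWhile (· == x), y = x := by
            intro y hy
            have := List.mem_takeWhile_imp hy
            simpa using this
          have hsplit : x :: xs = (x :: xs.takeWhile (· == x)) ++ xs.dropWhile (· == x) := by
            simp [List.takeWhile_append_dropWhile]
          have hlen0 : (0:Int) ≤ ((xs.takeWhile (· == x)).length : Int) := by positivity
          cases x with
          | false =>
              have hall : ∀ y ∈ false :: xs.takeWhile (· == false), y = false := by
                intro y hy
                rcases List.mem_cons.mp hy with h | h
                · exact h
                · exact htwall y h
              conv_lhs => rw [hsplit]
              rw [pvEnumFrom_append, List.foldl_append, pvRuns_cons]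
              simp only [Bool.false_eq_true, if_false]
              rw [pvFold_false _ hall i ml bs cs hml]
              have hidx : i + (((false :: xs.takeWhile (· == false)).length : ℕ) : Int) =
                  i + (1 + ((xs.takeWhile (· == false)).length : Int)) := by
                simp only [List.length_cons]; push_cast; ring
              rw [hidx]
              exact ih _ hrlen _ ml bs cs (by simp at hlen0 ⊢; omega) hml hbs
          | true =>
              have htwtrue : ∀ y ∈ xs.takeWhile (· == true), y = true := htwall
              have hrest' : xs.dropWhile (· == true) = [] ∨
                  ∃ r rs, xs.dropWhile (· == true) = r :: rs ∧ r = false := by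
                cases hre : xs.dropWhile (· == true) with
                | nil => exact Or.inl rfl
                | cons r rs =>
                    right
                    refine ⟨r, rs, rfl, ?_⟩
                    have := List.head?_dropWhile_not (p := (· == true)) (l := xs)
                    rw [hre] at this
                    simp at this
                    exact this
              conv_lhs => rw [hsplit]
              rw [pvEnumFrom_append, List.foldl_append, pvRuns_cons]
              simp only [if_true]
              simp only [pvEnumFrom, List.foldl_cons, pvStepA_true0 i ml bs cs]
              rw [pvFold_true _ htwtrue (i + 1) ml bs 1 i (by omega)]
              have hidx : i + (((true :: xs.takeWhile (· == true)).length : ℕ) : Int) =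
                  i + (1 + ((xs.takeWhile (· == true)).length : Int)) := by
                simp only [List.length_cons]; push_cast; ring
              rw [hidx]
              set n : Int := 1 + ((xs.takeWhile (· == true)).length : Int) with hndef
              have hn1 : 1 ≤ n := by rw [hndef]; omega
              rw [pvFlush _ hrest' _ ml bs n i (by omega)]
              have hml' : (0:Int) ≤ (if n > ml then n else ml) := by split_ifs <;> omega
              have hbs' : (if n > ml then i else bs) = -1 → (if n > ml then n else ml) = 0 := by
                split_ifs with h
                · intro hi1; omega
                · exact hbs
              rw [ih _ hrlen _ _ _ i (by omega) hml' hbs']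
              unfold pvResult
              simp only [List.foldl_cons]
              have hpick : pvPick (bs, ml) (i, n) =
                  ((if n > ml then i else bs), (if n > ml then n else ml)) := by
                unfold pvPick
                split_ifs with h <;> simp
              rw [hpick]

-- bridge pvResult at the initial state to B's selection
lemma pvBridge (l : List Bool) : pvResult 0 (-1) (pvRuns l 0) = find_longest_contig_segment_py_alt l := by
  unfold find_longest_contig_segment_py_alt
  cases hr : pvRuns l 0 with
  | nil => simp [pvResult]
  | cons h t =>
      have hmem := pvRuns_pos l.length l le_rfl 0
      have hh : 0 ≤ h.1 ∧ 1 ≤ h.2 := by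
        rw [hr] at hmem; exact hmem h (by simp)
      unfold pvResult
      simp only [List.foldl_cons]
      have hpick : pvPick (-1, 0) h = h := by
        unfold pvPick; rw [if_pos (by omega)]
      rw [hpick]
      have hne : (t.foldl pvPick h).1 ≠ -1 := by
        rcases pvPick_mem h t with he | he
        · rw [he]; omega
        · have := by rw [hr] at hmem; exact hmem _ (List.mem_cons_of_mem h he)
          omega
      simp [hne]

-- ===== VERDICT (by name: the statement is the Claim_ definition above) =====
theorem find_longest_contig_segment_py_spec : Claim_equal_find_longest_contig_segment_py := by
  intro bool_arr _
  unfold Spec_find_longest_contig_segment_py find_longest_contig_segment_py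
  rw [pvMain bool_arr.length bool_arr le_rfl 0 0 (-1) (-1) le_rfl le_rfl (fun _ => rfl)]
  exact pvBridge bool_arr
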